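-- pv_equiv track=rewrite | github.com/mariusog/grocery_bot | grocery_bot/planner/inventory.py | _count_usable_inventory
-- ===== SOURCE A (Python) =====
-- from typing import Any
--
-- def _count_usable_inventory(
--
--     bot: dict[str, Any],
--     remaining: dict[str, int],
--     reserved: dict[str, int] | None = None,
-- ) -> tuple[int, int]:
--     """Count inventory copies that can still satisfy the remaining need."""
--     skip = dict(reserved or {})
--     useful_total = 0
--     useful_types: set[str] = set()
--
--     for item in bot["inventory"]:
--         if skip.get(item, 0) > 0:
--             skip[item] -= 1
--             continue
--         if remaining.get(item, 0) <= 0: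
--             continue
--         useful_total += 1
--         useful_types.add(item)
--
--     return useful_total, len(useful_types)
-- ===== SOURCE B (Python) =====
-- from collections import Counter
--
--
-- def _count_usable_inventory(
--     bot,
--     remaining,
--     reserved=None,
-- ):
--     """Count inventory copies that can still satisfy the remaining need."""
--     res = reserved or {}
--     counts = Counter(bot["inventory"])
--     useful_total = 0
--     useful_types = 0
--     for item, c in counts.items():
--         if remaining.get(item, 0) <= 0:
--             continue
--         usable = c - max(res.get(item, 0), 0)
--         if usable > 0:
--             useful_total += usable
--             useful_types += 1
--     return useful_total, useful_types
-- ===== Notes on version B (the rewrite author's own statement) =====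
-- stated objective: alternative
-- what changed: Replaces the per-occurrence scan with a running skip dict and a membership set by a Counter of the inventory followed by one aggregation pass over the distinct item types (usable = count - reserved, clipped at 0).
import Mathlib
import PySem

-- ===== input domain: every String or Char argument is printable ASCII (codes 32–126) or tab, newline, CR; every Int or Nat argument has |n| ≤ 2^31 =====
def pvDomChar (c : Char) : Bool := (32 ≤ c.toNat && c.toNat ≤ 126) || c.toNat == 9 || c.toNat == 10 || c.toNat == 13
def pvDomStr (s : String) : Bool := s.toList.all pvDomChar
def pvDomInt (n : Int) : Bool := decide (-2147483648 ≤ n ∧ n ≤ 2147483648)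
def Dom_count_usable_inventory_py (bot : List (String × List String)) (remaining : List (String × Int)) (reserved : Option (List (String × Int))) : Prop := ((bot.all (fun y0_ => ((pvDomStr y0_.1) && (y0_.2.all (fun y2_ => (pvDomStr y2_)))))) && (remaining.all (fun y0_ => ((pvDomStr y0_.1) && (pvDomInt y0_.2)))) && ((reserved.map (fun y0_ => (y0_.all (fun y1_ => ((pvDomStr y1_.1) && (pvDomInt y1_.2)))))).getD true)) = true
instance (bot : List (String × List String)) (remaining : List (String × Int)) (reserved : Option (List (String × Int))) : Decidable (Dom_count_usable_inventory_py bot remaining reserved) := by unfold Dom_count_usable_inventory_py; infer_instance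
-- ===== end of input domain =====

-- B replaces A's per-occurrence scan (mutable skip dict + membership set) by a Counter of the
-- inventory and one aggregation pass over the distinct item types (alternative decomposition,
-- same return value wherever bot has an "inventory" key).

-- ===== PORT A =====
def count_usable_inventory_py (bot : List (String × List String)) (remaining : List (String × Int)) (reserved : Option (List (String × Int))) : Int × Int :=
  let skip : PySem.Dict String Int := PySem.Dict.mk (reserved.getD [])
  let inv : List String := (PySem.Dict.mk bot).getD "inventory" []
  let st := inv.foldl
    (fun (st : PySem.Dict String Int × Int × PySem.Set String) item =>
      if st.1.getD item 0 > 0 then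
        (st.1.modify item 0 (· - 1), st.2.1, st.2.2)
      else if (PySem.Dict.mk remaining).getD item 0 ≤ 0 then
        st
      else
        (st.1, st.2.1 + 1, PySem.Set.add st.2.2 item))
    (skip, 0, PySem.Set.empty)
  (st.2.1, PySem.Set.len st.2.2)

-- ===== PORT B =====
def count_usable_inventory_py_alt (bot : List (String × List String)) (remaining : List (String × Int)) (reserved : Option (List (String × Int))) : Int × Int :=
  let res : PySem.Dict String Int := PySem.Dict.mk (reserved.getD [])
  let counts : PySem.Dict String Int := PySem.Dict.counter ((PySem.Dict.mk bot).getD "inventory" [])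
  counts.items.foldl
    (fun (acc : Int × Int) p =>
      if (PySem.Dict.mk remaining).getD p.1 0 ≤ 0 then acc
      else
        let usable := p.2 - max (res.getD p.1 0) 0
        if usable > 0 then (acc.1 + usable, acc.2 + 1) else acc)
    (0, 0)


-- ===== PRECONDITION & SPEC =====
-- Pre_ excludes exactly the inputs on which the Python A raises KeyError: a bot without an
-- "inventory" key (B raises there as well).
def Pre_count_usable_inventory_py (bot : List (String × List String)) (remaining : List (String × Int)) (reserved : Option (List (String × Int))) : Prop :=
  "inventory" ∈ bot.map Prod.fst
instance (bot : List (String × List String)) (remaining : List (String × Int)) (reserved : Option (List (String × Int))) : Decidable (Pre_count_usable_inventory_py bot remaining reserved) := by unfold Pre_count_usable_inventory_py; infer_instance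

def pvWitness_count_usable_inventory_py : (List (String × List String)) × (List (String × Int)) × (Option (List (String × Int))) :=
  ([("inventory", ["apple", "apple", "banana"])], [("apple", 2)], some [("apple", 1)])

def Spec_count_usable_inventory_py (bot : List (String × List String)) (remaining : List (String × Int)) (reserved : Option (List (String × Int))) (out : Int × Int) : Prop := out = count_usable_inventory_py_alt bot remaining reserved
instance (bot : List (String × List String)) (remaining : List (String × Int)) (reserved : Option (List (String × Int))) (out : Int × Int) : Decidable (Spec_count_usable_inventory_py bot remaining reserved out) := by unfold Spec_count_usable_inventory_py; infer_instance

-- ===== CLAIM (what is proved, stated in full; the proofs are below) =====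
def Claim_equal_count_usable_inventory_py : Prop := ∀ (bot : List (String × List String)) (remaining : List (String × Int)) (reserved : Option (List (String × Int))), Dom_count_usable_inventory_py bot remaining reserved → Pre_count_usable_inventory_py bot remaining reserved → Spec_count_usable_inventory_py bot remaining reserved (count_usable_inventory_py bot remaining reserved)

-- ===== LEMMAS AND PROOFS =====

def pvRem (remaining : List (String × Int)) (t : String) : Int := (PySem.Dict.mk remaining).getD t 0

def pvTotal (remaining : List (String × Int)) : List String → (String → Int) → Int
  | [], _ => 0
  | h :: tl, s =>
    if s h > 0 then pvTotal remaining tl (fun t => if t = h then s h - 1 else s t)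
    else if pvRem remaining h ≤ 0 then pvTotal remaining tl s
    else 1 + pvTotal remaining tl s

def pvTypesL (remaining : List (String × Int)) : List String → (String → Int) → List String
  | [], _ => []
  | h :: tl, s =>
    if s h > 0 then pvTypesL remaining tl (fun t => if t = h then s h - 1 else s t)
    else if pvRem remaining h ≤ 0 then pvTypesL remaining tl s
    else h :: pvTypesL remaining tl s

def pvStepA (remaining : List (String × Int)) (st : PySem.Dict String Int × Int × PySem.Set String) (item : String) : PySem.Dict String Int × Int × PySem.Set String :=
  if st.1.getD item 0 > 0 then
    (st.1.modify item 0 (· - 1), st.2.1, st.2.2)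
  else if (PySem.Dict.mk remaining).getD item 0 ≤ 0 then
    st
  else
    (st.1, st.2.1 + 1, PySem.Set.add st.2.2 item)

theorem pv_aloop (remaining : List (String × Int)) (inv : List String) :
    ∀ (d : PySem.Dict String Int) (tot : Int) (T : PySem.Set String),
      (inv.foldl (pvStepA remaining) (d, tot, T)).2.1
          = tot + pvTotal remaining inv (fun t => d.getD t 0)
      ∧ (inv.foldl (pvStepA remaining) (d, tot, T)).2.2
          = PySem.Set.update T (pvTypesL remaining inv (fun t => d.getD t 0)) := by
  induction inv with
  | nil => intro d tot T; simp [pvTotal, pvTypesL, PySem.Set.update]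
  | cons x tl ih =>
    intro d tot T
    simp only [List.foldl_cons, pvStepA, pvTotal, pvTypesL]
    by_cases h1 : d.getD x 0 > 0
    · simp only [h1, if_pos]
      have hv : (fun t => (d.modify x 0 (· - 1)).getD t 0)
          = (fun t => if t = x then d.getD x 0 - 1 else d.getD t 0) := by
        funext t; rw [PySem.Dict.getD_modify]
      rcases ih (d.modify x 0 (· - 1)) tot T with ⟨e1, e2⟩
      rw [e1, e2, hv]
      exact ⟨rfl, rfl⟩
    · simp only [h1, if_false]
      by_cases h2 : pvRem remaining x ≤ 0
      · have h2' : (PySem.Dict.mk remaining).getD x 0 ≤ 0 := h2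
        simp only [h2', h2, if_pos]
        exact ih d tot T
      · have h2' : ¬ (PySem.Dict.mk remaining).getD x 0 ≤ 0 := h2
        simp only [h2', h2, if_false]
        rcases ih d (tot + 1) (PySem.Set.add T x) with ⟨e1, e2⟩
        refine ⟨?_, ?_⟩
        · rw [e1]; ring
        · rw [e2]; rfl

def pvPay (remaining : List (String × Int)) (s : String → Int) (c : Nat) (t : String) : Int :=
  if pvRem remaining t > 0 then max ((c : Int) - max (s t) 0) 0 else 0

theorem pv_sum_diff_one (h : String) (f g : String → Int) :
    ∀ (D : List String), D.Nodup → h ∈ D → (∀ t, t ≠ h → f t = g t) → f h = g h + 1 →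
      (D.map f).sum = (D.map g).sum + 1 := by
  intro D
  induction D with
  | nil => simp
  | cons a D' ih =>
    intro hnd hmem hne hfh
    rcases List.mem_cons.mp hmem with rfl | hmem'
    · have hall : ∀ t ∈ D', f t = g t := by
        intro t ht
        exact hne t (fun hth => (List.nodup_cons.mp hnd).1 (hth ▸ ht))
      simp only [List.map_cons, List.sum_cons, List.map_congr_left hall, hfh]
      ring
    · have ha : a ≠ h := fun hah => (List.nodup_cons.mp hnd).1 (hah ▸ hmem')
      simp only [List.map_cons, List.sum_cons,
        ih (List.nodup_cons.mp hnd).2 hmem' hne hfh, hne a ha]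
      ring

theorem pv_total_eq_sum (remaining : List (String × Int)) (inv : List String) :
    ∀ (s : String → Int) (D : List String), D.Nodup → (∀ t ∈ inv, t ∈ D) →
      pvTotal remaining inv s = (D.map (fun t => pvPay remaining s (inv.count t) t)).sum := by
  induction inv with
  | nil =>
    intro s D _ _
    simp [pvTotal, pvPay]
  | cons x tl ih =>
    intro s D hnd hsub
    have hxD : x ∈ D := hsub x List.mem_cons_self
    have hcount : ∀ t : String, List.count t (x :: tl) = List.count t tl + (if x = t then 1 else 0) := by
      intro t; simp [List.count_cons]
    have hsub' : ∀ t ∈ tl, t ∈ D := fun t ht => hsub t (List.mem_cons_of_mem _ ht)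
    simp only [pvTotal]
    by_cases h1 : s x > 0
    · simp only [h1, if_pos]
      rw [ih _ D hnd hsub']
      refine congrArg _ (List.map_congr_left ?_)
      intro t _
      by_cases hth : t = x
      · subst hth
        simp only [pvPay, hcount t]
        split_ifs with hr
        · push_cast; omega
        · rfl
      · simp only [pvPay, hcount t, if_neg (fun he => hth (Eq.symm he)), if_neg hth]
        simp
    · simp only [h1, if_false]
      by_cases h2 : pvRem remaining x ≤ 0
      · simp only [h2, if_pos]
        rw [ih s D hnd hsub']
        refine congrArg _ (List.map_congr_left ?_)
        intro t _
        by_cases hth : t = x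
        · subst hth
          simp [pvPay, show ¬ pvRem remaining t > 0 by omega]
        · simp only [pvPay, hcount t,
            if_neg (show ¬ (x = t) from fun he => hth (Eq.symm he))]
          simp
      · simp only [h2, if_false]
        have hne : ∀ t, t ≠ x → (fun t => pvPay remaining s (List.count t (x :: tl)) t) t
            = (fun t => pvPay remaining s (List.count t tl) t) t := by
          intro t hth
          simp only [pvPay, hcount t,
            if_neg (show ¬ (x = t) from fun he => hth (Eq.symm he))]
          simp
        have heq : (fun t => pvPay remaining s (List.count t (x :: tl)) t) x
            = (fun t => pvPay remaining s (List.count t tl) t) x + 1 := by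
          simp only [pvPay, hcount x, if_pos (show pvRem remaining x > 0 by omega)]
          push_cast; omega
        rw [ih s D hnd hsub',
          pv_sum_diff_one x (fun t => pvPay remaining s (List.count t (x :: tl)) t)
            (fun t => pvPay remaining s (List.count t tl) t) D hnd hxD hne heq]
        ring

theorem pv_mem_typesL (remaining : List (String × Int)) (inv : List String) :
    ∀ (s : String → Int) (t : String),
      t ∈ pvTypesL remaining inv s
        ↔ pvRem remaining t > 0 ∧ (inv.count t : Int) - max (s t) 0 > 0 := by
  induction inv with
  | nil => intro s t; simp [pvTypesL]
  | cons x tl ih =>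
    intro s t
    simp only [pvTypesL]
    by_cases h1 : s x > 0
    · simp only [h1, if_pos]
      rw [ih]
      by_cases hth : t = x
      · subst hth
        rw [List.count_cons_self]
        simp only [if_pos (rfl : t = t)]
        push_cast
        constructor <;> (rintro ⟨hr, hc⟩; exact ⟨hr, by omega⟩)
      · rw [List.count_cons_of_ne (show x ≠ t from fun he => hth (Eq.symm he)), if_neg hth]
    · simp only [h1, if_false]
      by_cases h2 : pvRem remaining x ≤ 0
      · simp only [h2, if_pos]
        rw [ih]
        by_cases hth : t = x
        · subst hth
          constructor <;> (rintro ⟨hr, _⟩; omega)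
        · rw [List.count_cons_of_ne (show x ≠ t from fun he => hth (Eq.symm he))]
      · simp only [h2, if_false, List.mem_cons]
        rw [ih]
        by_cases hth : t = x
        · subst hth
          rw [List.count_cons_self]
          constructor
          · intro _
            refine ⟨by omega, ?_⟩
            have h0 : (0:Int) ≤ (List.count t tl : Int) := by positivity
            push_cast
            omega
          · intro _; left; rfl
        · rw [List.count_cons_of_ne (show x ≠ t from fun he => hth (Eq.symm he))]
          simp [hth]

theorem pv_len_eq_countP (Q : String → Prop) [DecidablePred Q] (L D : List String)
    (hL : L.Nodup) (hD : D.Nodup) (hmem : ∀ t, t ∈ L ↔ Q t) (hQD : ∀ t, Q t → t ∈ D) :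
    L.length = D.countP (fun t => decide (Q t)) := by
  rw [List.countP_eq_length_filter, ← List.toFinset_card_of_nodup hL,
    ← List.toFinset_card_of_nodup (hD.filter _)]
  congr 1
  apply Finset.ext
  intro t
  simp only [List.mem_toFinset, List.mem_filter, decide_eq_true_eq, hmem t]
  exact ⟨fun hq => ⟨hQD t hq, hq⟩, fun ⟨_, hq⟩ => hq⟩

def pvStepB (remaining : List (String × Int)) (res : PySem.Dict String Int) (acc : Int × Int) (p : String × Int) : Int × Int :=
  if (PySem.Dict.mk remaining).getD p.1 0 ≤ 0 then acc
  else
    let usable := p.2 - max (res.getD p.1 0) 0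
    if usable > 0 then (acc.1 + usable, acc.2 + 1) else acc

theorem pv_stepB_eq (remaining : List (String × Int)) (res : PySem.Dict String Int)
    (a b : Int) (x : String) (c : Nat) :
    pvStepB remaining res (a, b) (x, (c : Int))
      = (a + pvPay remaining (fun u => res.getD u 0) c x,
         b + (if pvRem remaining x > 0 ∧ (c : Int) - max (res.getD x 0) 0 > 0 then 1 else 0)) := by
  have hr : (PySem.Dict.mk remaining).getD x 0 = pvRem remaining x := rfl
  simp only [pvStepB, pvPay, hr]
  split_ifs with h1 h2 h3 h3 h2 <;> refine Prod.ext ?_ ?_ <;> simp <;> omega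

theorem pv_bloop (remaining : List (String × Int)) (res : PySem.Dict String Int)
    (inv : List String) (D : List String) :
    ∀ (a b : Int),
      (D.map (fun k => (k, (inv.count k : Int)))).foldl (pvStepB remaining res) (a, b)
        = (a + (D.map (fun t => pvPay remaining (fun u => res.getD u 0) (inv.count t) t)).sum,
           b + (D.countP (fun t => decide (pvRem remaining t > 0 ∧ (inv.count t : Int) - max (res.getD t 0) 0 > 0)) : Int)) := by
  induction D with
  | nil => intro a b; simp
  | cons x D' ih =>
    intro a b
    simp only [List.map_cons, List.foldl_cons, List.sum_cons, List.countP_cons,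
      pv_stepB_eq]
    rw [ih]
    refine Prod.ext ?_ ?_
    · simp; ring
    · simp only []
      by_cases h : pvRem remaining x > 0 ∧ ((inv.count x : Nat) : Int) - max (res.getD x 0) 0 > 0
      · simp only [if_pos h, decide_eq_true_eq]
        push_cast
        ring
      · simp only [if_neg h, decide_eq_true_eq]
        push_cast
        ring

theorem pv_main (bot : List (String × List String)) (remaining : List (String × Int)) (reserved : Option (List (String × Int))) :
    count_usable_inventory_py bot remaining reserved = count_usable_inventory_py_alt bot remaining reserved := by
  unfold count_usable_inventory_py count_usable_inventory_py_alt
  simp only []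
  have hstepA : (fun (st : PySem.Dict String Int × Int × PySem.Set String) item =>
      if st.1.getD item 0 > 0 then
        (st.1.modify item 0 (· - 1), st.2.1, st.2.2)
      else if (PySem.Dict.mk remaining).getD item 0 ≤ 0 then
        st
      else
        (st.1, st.2.1 + 1, PySem.Set.add st.2.2 item)) = pvStepA remaining := rfl
  have hstepB : (fun (acc : Int × Int) (p : String × Int) =>
      if (PySem.Dict.mk remaining).getD p.1 0 ≤ 0 then acc
      else
        let usable := p.2 - max ((PySem.Dict.mk (reserved.getD [])).getD p.1 0) 0
        if usable > 0 then (acc.1 + usable, acc.2 + 1) else acc)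
      = pvStepB remaining (PySem.Dict.mk (reserved.getD [])) := rfl
  rw [hstepA, hstepB, PySem.Dict.items_counter]
  set inv : List String := (PySem.Dict.mk bot).getD "inventory" [] with hinv
  set d0 : PySem.Dict String Int := PySem.Dict.mk (reserved.getD []) with hd0
  set D : List String := PySem.Set.ofList inv with hD
  rcases pv_aloop remaining inv d0 0 PySem.Set.empty with ⟨e1, e2⟩
  rw [e1, e2, pv_bloop remaining d0 inv D 0 0]
  have hnd : D.Nodup := PySem.Set.nodup_ofList inv
  have hsub : ∀ t ∈ inv, t ∈ D := fun t ht => (PySem.Set.mem_ofList inv t).mpr ht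
  refine Prod.ext ?_ ?_
  · simp only []
    rw [pv_total_eq_sum remaining inv (fun t => d0.getD t 0) D hnd hsub]
  · simp only []
    have hlen : (PySem.Set.update PySem.Set.empty
        (pvTypesL remaining inv (fun t => d0.getD t 0)))
        = PySem.Set.ofList (pvTypesL remaining inv (fun t => d0.getD t 0)) := rfl
    rw [hlen]
    have := pv_len_eq_countP
      (fun t => pvRem remaining t > 0 ∧ (inv.count t : Int) - max (d0.getD t 0) 0 > 0)
      (PySem.Set.ofList (pvTypesL remaining inv (fun t => d0.getD t 0))) D
      (PySem.Set.nodup_ofList _) hnd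
      (fun t => by
        rw [PySem.Set.mem_ofList, pv_mem_typesL])
      (fun t ht => by
        refine hsub t ?_
        have : 0 < inv.count t := by
          rcases ht with ⟨_, hc⟩
          by_contra h0
          omega
        exact List.count_pos_iff.mp this)
    show PySem.Set.len _ = _
    unfold PySem.Set.len
    rw [this, zero_add]

-- ===== VERDICT (by name: the statement is the Claim_ definition above) =====
theorem count_usable_inventory_py_spec : Claim_equal_count_usable_inventory_py := by
  intro bot remaining reserved _ _
  exact pv_main bot remaining reserved
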